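-- pv_equiv track=rewrite | github.com/vedant-f-is-ma/PRojects | googleinterviewquestion.py | words_similar
-- ===== SOURCE A (Python) =====
-- def words_similar(string1: str, string2: str) -> bool:
--     string1elements = list(string1)
--     string2elements = list(string2)
--
--     match_count = 0
--
--     for s1 in string1elements:
--         if s1 in string2elements:
--                 match_count += 1
--
--     if match_count >= 2:
--         return True
--
--     return False
-- ===== SOURCE B (Python) =====
-- def words_similar(string1: str, string2: str) -> bool:
--     # Table-first: walk the DISTINCT characters of string1 (first-occurrence order),
--     # adding each matching character's multiplicity in string1.
--     total = 0
--     for ch in dict.fromkeys(string1):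
--         if ch in string2:
--             total += string1.count(ch)
--     return total >= 2
-- ===== Notes on version B (the rewrite author's own statement) =====
-- stated objective: faster
-- what changed: B first deduplicates string1 and sums, per distinct character that occurs in string2, its multiplicity in string1, instead of A's per-position scan of string1 against a list of string2's characters.
import Mathlib
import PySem

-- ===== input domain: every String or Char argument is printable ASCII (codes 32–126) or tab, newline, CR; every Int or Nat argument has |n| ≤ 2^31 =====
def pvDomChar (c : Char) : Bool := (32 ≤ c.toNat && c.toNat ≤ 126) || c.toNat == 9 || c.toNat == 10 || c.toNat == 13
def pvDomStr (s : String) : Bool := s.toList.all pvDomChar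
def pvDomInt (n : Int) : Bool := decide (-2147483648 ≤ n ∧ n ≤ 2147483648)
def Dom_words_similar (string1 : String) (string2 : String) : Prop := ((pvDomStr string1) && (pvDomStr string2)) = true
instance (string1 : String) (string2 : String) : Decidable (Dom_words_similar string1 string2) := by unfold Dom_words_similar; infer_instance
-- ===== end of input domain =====

-- B replaces A's per-position scan by a pass over string1's distinct characters,
-- summing each matching character's multiplicity (alternative decomposition, same result).


-- ===== PORT A =====
def words_similar (string1 : String) (string2 : String) : Bool :=
  let string1elements := string1.toList
  let string2elements := string2.toList
  let match_count : Int :=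
    string1elements.foldl (fun acc s1 => if s1 ∈ string2elements then acc + 1 else acc) 0
  if match_count ≥ 2 then true else false

-- ===== PORT B =====
-- 'ch in string2' on a single character is exactly char membership in string2's characters.
def words_similar_alt (string1 : String) (string2 : String) : Bool :=
  let total : Int :=
    (PySem.List.dedup string1.toList).foldl
      (fun acc ch =>
        if ch ∈ string2.toList then acc + (PySem.List.count string1.toList ch : Int) else acc) 0
  decide (total ≥ 2)

-- ===== PRECONDITION & SPEC =====
def Spec_words_similar (string1 : String) (string2 : String) (out : Bool) : Prop := out = words_similar_alt string1 string2
instance (string1 : String) (string2 : String) (out : Bool) : Decidable (Spec_words_similar string1 string2 out) := by unfold Spec_words_similar; infer_instance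

-- ===== CLAIM (what is proved, stated in full; the proofs are below) =====
def Claim_equal_words_similar : Prop := ∀ (string1 : String) (string2 : String), Dom_words_similar string1 string2 → Spec_words_similar string1 string2 (words_similar string1 string2)

-- ===== LEMMAS AND PROOFS =====

-- exactly one element of a nodup list equals x, so the indicator sum collapses to v
theorem sum_map_ite_eq_mem {d : List Char} (x : Char) (v : Int)
    (hnd : d.Nodup) (hx : x ∈ d) :
    (d.map fun c => if c = x then v else 0).sum = v := by
  induction d with
  | nil => cases hx
  | cons a t ih =>
    rcases List.mem_cons.mp hx with h | h
    · subst h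
      have hxt : x ∉ t := (List.nodup_cons.mp hnd).1
      have hz : (t.map fun c => if c = x then v else 0).sum = 0 := by
        apply List.sum_eq_zero
        intro y hy
        rcases List.mem_map.mp hy with ⟨c, hc, rfl⟩
        have hcx : c ≠ x := fun h => hxt (h ▸ hc)
        simp [hcx]
      simp [hz]
    · have hax : a ≠ x := fun he => (List.nodup_cons.mp hnd).1 (he ▸ h)
      have := ih (List.nodup_cons.mp hnd).2 h
      simp [hax, this]

-- weighted sum over a nodup superset of l's elements equals the positional count
theorem dedup_weighted_sum (m : List Char) (d : List Char) (hnd : d.Nodup) :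
    ∀ l : List Char, (∀ x ∈ l, x ∈ d) →
    (d.map fun c => if c ∈ m then (l.count c : Int) else 0).sum
      = (l.countP (fun c => decide (c ∈ m)) : Int) := by
  intro l
  induction l with
  | nil =>
    intro _
    simp
  | cons x t ih =>
    intro hsub
    have hxd : x ∈ d := hsub x (List.mem_cons_self ..)
    have ht := ih (fun y hy => hsub y (List.mem_cons_of_mem _ hy))
    have hsplit :
        (d.map fun c => if c ∈ m then ((x :: t).count c : Int) else 0)
          = (d.map fun c =>
              (if c ∈ m then (t.count c : Int) else 0) + (if c = x ∧ c ∈ m then 1 else 0)) := by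
      apply List.map_congr_left
      intro c _
      by_cases hc : c ∈ m
      · by_cases hcx : c = x
        · subst hcx
          simp [hc, List.count_cons_self]
        · have hxc : ¬ x = c := fun h => hcx h.symm
          simp [hc, hcx, hxc]
      · simp [hc]
    rw [hsplit, PySem.List.sum_map_add_int]
    by_cases hxm : x ∈ m
    · have hT : (d.map fun c => if c = x ∧ c ∈ m then (1:Int) else 0).sum = 1 := by
        have h1 : (d.map fun c => if c = x ∧ c ∈ m then (1:Int) else 0)
            = d.map fun c => if c = x then (1:Int) else 0 := by
          apply List.map_congr_left
          intro c _
          by_cases hcx : c = x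
          · subst hcx; simp [hxm]
          · simp [hcx]
        rw [h1, sum_map_ite_eq_mem x 1 hnd hxd]
      rw [ht, hT]
      simp [hxm]
    · have hT : (d.map fun c => if c = x ∧ c ∈ m then (1:Int) else 0).sum = 0 := by
        apply List.sum_eq_zero
        intro y hy
        rcases List.mem_map.mp hy with ⟨c, hc, rfl⟩
        by_cases hcx : c = x
        · simp [hcx, hxm]
        · simp [hcx]
      rw [ht, hT]
      simp [hxm]
    
-- B's fold is the weighted sum over the dedup list
theorem alt_fold_eq_sum (l m : List Char) :
    (PySem.List.dedup l).foldl
        (fun acc ch => if ch ∈ m then acc + (PySem.List.count l ch : Int) else acc) 0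
      = ((PySem.List.dedup l).map fun c => if c ∈ m then (l.count c : Int) else 0).sum := by
  have hfun :
      (fun (acc : Int) (ch : Char) => if ch ∈ m then acc + (PySem.List.count l ch : Int) else acc)
        = fun acc ch => acc + (if ch ∈ m then (l.count ch : Int) else 0) := by
    funext acc ch
    by_cases h : ch ∈ m <;> simp [h, PySem.List.count]
  rw [hfun, PySem.List.foldl_add]
  simp

-- ===== VERDICT (by name: the statement is the Claim_ definition above) =====
theorem words_similar_spec : Claim_equal_words_similar := by
  intro s1 s2 _
  show words_similar s1 s2 = words_similar_alt s1 s2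
  simp only [words_similar, words_similar_alt]
  rw [alt_fold_eq_sum s1.toList s2.toList,
      dedup_weighted_sum s2.toList (PySem.List.dedup s1.toList)
        (PySem.List.nodup_dedup _) s1.toList
        (fun x hx => (PySem.List.mem_dedup _ _).mpr hx)]
  have := PySem.List.foldl_count_if (fun c => decide (c ∈ s2.toList)) s1.toList 0
  simp only [decide_eq_true_eq] at this
  rw [this]
  by_cases h : (0 : Int) + (s1.toList.countP fun c => decide (c ∈ s2.toList)) ≥ 2 <;>
    simp_all
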